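-- pv_equiv track=rewrite | github.com/suchak1/hyperdrive | hyperdrive/History.py | unfill
-- ===== SOURCE A (Python) =====
-- def unfill(xs):
--     if not len(xs):
--         return xs
--     curr = xs[0]
--     new = [curr]
--     for x in xs[1:]:
--         if curr != x:
--             new.append(x)
--             curr = x
--         else:
--             new.append(None)
--     return new
-- ===== SOURCE B (Python) =====
-- def unfill(xs):
--     n = len(xs)
--     if not n:
--         return xs
--     new = []
--     i = 0
--     while i < n:
--         j = i + 1
--         while j < n and xs[j] == xs[i]:
--             j += 1
--         new.append(xs[i])
--         new.extend([None] * (j - i - 1))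
--         i = j
--     return new
-- ===== Notes on version B (the rewrite author's own statement) =====
-- stated objective: alternative
-- what changed: B walks the list run by run with a two-pointer scan (find the end of each run of consecutive equal elements, emit its first element followed by None for the rest), instead of A's single stateful cursor comparing each element to the current run leader.
import Mathlib
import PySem

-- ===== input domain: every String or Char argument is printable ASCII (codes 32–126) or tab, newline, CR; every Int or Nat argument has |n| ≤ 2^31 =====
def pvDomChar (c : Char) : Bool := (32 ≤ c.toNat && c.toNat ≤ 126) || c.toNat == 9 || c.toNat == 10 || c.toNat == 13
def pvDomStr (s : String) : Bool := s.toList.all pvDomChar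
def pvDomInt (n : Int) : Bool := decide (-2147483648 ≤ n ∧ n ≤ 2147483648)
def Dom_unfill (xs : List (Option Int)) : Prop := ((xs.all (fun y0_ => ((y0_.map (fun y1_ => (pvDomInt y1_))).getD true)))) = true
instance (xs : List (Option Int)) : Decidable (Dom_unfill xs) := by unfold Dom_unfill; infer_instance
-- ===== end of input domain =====

-- B replaces A's stateful run-leader cursor by a run-by-run two-pointer scan (alternative decomposition, same O(n) cost).

-- ===== PORT A =====
-- the for-loop over xs[1:] with state (curr, new)
def unfillGo (curr : Option Int) (acc : List (Option Int)) : List (Option Int) → List (Option Int)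
  | [] => acc
  | x :: rest =>
    if curr ≠ x then unfillGo x (acc ++ [x]) rest
    else unfillGo curr (acc ++ [none]) rest

def unfill (xs : List (Option Int)) : List (Option Int) :=
  match xs with
  | [] => []
  | c :: rest => unfillGo c [c] rest

-- ===== PORT B =====
-- outer while loop: each step consumes one run (inner while = takeWhile of equal elements)
def unfillRuns : List (Option Int) → List (Option Int)
  | [] => []
  | x :: rest =>
    (x :: (rest.takeWhile (· == x)).map (fun _ => (none : Option Int)))
      ++ unfillRuns (rest.dropWhile (· == x))
termination_by l => l.length
decreasing_by
  simp only [List.length_cons]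
  exact Nat.lt_succ_of_le (List.length_dropWhile_le _ _)

def unfill_alt (xs : List (Option Int)) : List (Option Int) :=
  match xs with
  | [] => []
  | _ :: _ => unfillRuns xs

-- ===== PRECONDITION & SPEC =====
def Spec_unfill (xs : List (Option Int)) (out : List (Option Int)) : Prop := out = unfill_alt xs
instance (xs : List (Option Int)) (out : List (Option Int)) : Decidable (Spec_unfill xs out) := by unfold Spec_unfill; infer_instance

-- ===== CLAIM (what is proved, stated in full; the proofs are below) =====
def Claim_equal_unfill : Prop := ∀ (xs : List (Option Int)), Dom_unfill xs → Spec_unfill xs (unfill xs)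

-- ===== LEMMAS AND PROOFS =====

-- A's loop only appends to its accumulator
theorem unfillGo_acc (rest : List (Option Int)) :
    ∀ (curr : Option Int) (acc : List (Option Int)),
    unfillGo curr acc rest = acc ++ unfillGo curr [] rest := by
  induction rest with
  | nil => intro curr acc; simp [unfillGo]
  | cons x r ih =>
    intro curr acc
    by_cases h : curr = x
    · simp [unfillGo, h]
      rw [ih x (acc ++ [none]), ih x [none]]
      simp
    · simp [unfillGo, h]
      rw [ih x [x], ih x (acc ++ [x])]
      simp

-- A's tail loop equals B's run decomposition of the tail (relative to the run leader)
theorem unfillGo_eq_runs (rest : List (Option Int)) :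
    ∀ (curr : Option Int),
    unfillGo curr [] rest =
      (rest.takeWhile (· == curr)).map (fun _ => (none : Option Int))
        ++ unfillRuns (rest.dropWhile (· == curr)) := by
  induction rest with
  | nil => intro curr; simp [unfillGo, unfillRuns]
  | cons x r ih =>
    intro curr
    by_cases h : curr = x
    · subst h
      simp only [unfillGo, ne_eq, not_true_eq_false, if_false, List.takeWhile_cons,
        List.dropWhile_cons, beq_self_eq_true, if_true, List.map_cons]
      rw [unfillGo_acc, ih]
      simp
    · have hb : (x == curr) = false := by simp [beq_eq_false_iff_ne]; exact fun h' => h h'.symm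
      simp only [unfillGo, ne_eq, h, not_false_eq_true, if_true, List.takeWhile_cons,
        List.dropWhile_cons, hb, List.nil_append]
      rw [unfillGo_acc, ih]
      simp [unfillRuns]

-- ===== VERDICT (by name: the statement is the Claim_ definition above) =====
theorem unfill_spec : Claim_equal_unfill := by
  intro xs _
  unfold Spec_unfill
  cases xs with
  | nil => rfl
  | cons c rest =>
    show unfill (c :: rest) = unfill_alt (c :: rest)
    simp only [unfill, unfill_alt]
    rw [unfillGo_acc, unfillGo_eq_runs]
    simp [unfillRuns]
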